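-- pv_equiv track=rewrite | github.com/UniboRick/embedding-algorithm | embedding_algorithm/helpers.py | find_double_shared
-- ===== SOURCE A (Python) =====
-- def base_nodes(pyr, apex_node):
--     """
--     Extract the base nodes of a pyramid by removing its apex node.
--
--     Parameters
--     ----------
--     pyr : iterable
--         Collection of node identifiers that form the full pyramid.
--     apex_node : hashable
--         Node identifier corresponding to the pyramid's apex.
--
--     Returns
--     -------
--     set
--         Set of nodes in pyr that are not part of apex_node.
--
--     Notes
--     -----
--     - The function performs a simple set difference: all nodes in pyr
--       except those listed in apex_node.
--     - The returned set is a new object and does not modify the inputs.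
--     """
--
--     return {n for n in pyr if n not in apex_node}
--
-- def find_double_shared(target_pyr, pyramids, apex_list):
--     """
--     Find all pyramids that share exactly two base nodes with a target pyramid.
--
--     Parameters
--     ----------
--     target_pyr : iterable
--         Collection of node identifiers defining the target pyramid.
--     pyramids : iterable
--         Iterable of pyramid descriptors (each a collection of node identifiers).
--     apex_list : iterable
--         Collection of node identifiers that correspond to apex nodes.
--         Used to distinguish apex nodes from base nodes.
--
--     Returns
--     -------
--     list of tuple
--         A list of pairs (pyramid, shared_nodes), where:
--         - pyramid is one of the pyramids that shares exactly two base nodes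
--           with target_pyr.
--         - shared_nodes is the set of the two shared base nodes.
--
--     Notes
--     -----
--     - The function identifies base nodes of a pyramid using base_nodes,
--       which removes nodes listed in apex_list.
--     - target_pyr is excluded from the search.
--     - A "double shared" pyramid is one whose base overlaps with the base of
--       target_pyr in exactly two nodes.
--     """
--
--     tgt_base = base_nodes(target_pyr, apex_list)
--     out = []
--     for p in pyramids:
--         if p is target_pyr:
--             continue
--         shared = tgt_base & base_nodes(p, apex_list)
--         if len(shared) == 2:
--             out.append((p, shared))
--     return out
-- ===== SOURCE B (Python) =====
-- def find_double_shared(target_pyr, pyramids, apex_list):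
--     # Table-first decomposition: iterate over the target's (deduplicated) base
--     # nodes, accumulating per-pyramid lists of shared nodes, then emit in one
--     # final pass the pyramids whose accumulator holds exactly two nodes.
--     tgt = []
--     for n in target_pyr:
--         if n not in apex_list and n not in tgt:
--             tgt.append(n)
--     table = [[] for _ in pyramids]
--     for node in tgt:
--         for i, p in enumerate(pyramids):
--             if p is not target_pyr and node in p:
--                 table[i].append(node)
--     return [(p, set(s)) for p, s in zip(pyramids, table) if len(s) == 2]
-- ===== Notes on version B (the rewrite author's own statement) =====
-- stated objective: alternative
-- what changed: Replaces the per-pyramid set-intersection loop by an inverted table-first pass: one loop over the target's deduplicated base nodes fills per-pyramid accumulators of shared nodes, and a final pass emits the pyramids whose accumulator has exactly two nodes.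
import Mathlib
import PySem

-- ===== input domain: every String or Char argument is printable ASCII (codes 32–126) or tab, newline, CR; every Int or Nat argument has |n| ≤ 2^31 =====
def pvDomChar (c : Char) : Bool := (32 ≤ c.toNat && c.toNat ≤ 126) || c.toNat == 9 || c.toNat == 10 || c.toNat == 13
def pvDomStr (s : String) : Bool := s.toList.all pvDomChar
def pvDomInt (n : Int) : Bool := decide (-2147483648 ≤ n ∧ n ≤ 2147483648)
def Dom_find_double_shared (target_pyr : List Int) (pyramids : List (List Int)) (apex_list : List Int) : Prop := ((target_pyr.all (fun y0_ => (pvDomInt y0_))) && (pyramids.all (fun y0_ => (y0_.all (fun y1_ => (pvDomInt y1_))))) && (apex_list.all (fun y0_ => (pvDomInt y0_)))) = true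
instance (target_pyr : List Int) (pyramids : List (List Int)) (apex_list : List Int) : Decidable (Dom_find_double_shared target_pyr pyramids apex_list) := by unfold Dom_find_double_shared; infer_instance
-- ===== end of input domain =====

-- B replaces A's per-pyramid set intersections by a table-first pass over the target's
-- deduplicated base nodes that fills per-pyramid accumulators (objective: alternative
-- decomposition, same cost class).  Note: Python's 'p is target_pyr' is an object-identity
-- test; the ports take independently constructed values, for which it is always False,
-- so both ports omit that branch (exact for such inputs).

-- ===== PORT A =====
def pvBaseNodes (pyr : List Int) (apex_node : List Int) : PySem.Set Int :=
  PySem.Set.ofList (pyr.filter (fun n => !apex_node.contains n))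

def find_double_shared (target_pyr : List Int) (pyramids : List (List Int)) (apex_list : List Int) : List (List Int × List Int) :=
  let tgt_base := pvBaseNodes target_pyr apex_list
  pyramids.foldl (fun out p =>
    let shared := PySem.Set.inter tgt_base (pvBaseNodes p apex_list)
    if PySem.Set.len shared = 2 then out ++ [(p, shared)] else out) []

-- ===== PORT B =====
-- B's first loop: the target's base nodes, deduplicated, in first-occurrence order
def pvTargetBase (target_pyr : List Int) (apex_list : List Int) : List Int :=
  target_pyr.foldl (fun acc n =>
    if !apex_list.contains n && !acc.contains n then acc ++ [n] else acc) ([] : List Int)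

-- B's table pass: one accumulator list per pyramid, filled node by node
def pvTable (pyramids : List (List Int)) (tgt : List Int) : List (List Int) :=
  tgt.foldl (fun tbl node =>
    (pyramids.zip tbl).map (fun q => if q.1.contains node then q.2 ++ [node] else q.2))
    (pyramids.map (fun _ => ([] : List Int)))

def find_double_shared_alt (target_pyr : List Int) (pyramids : List (List Int)) (apex_list : List Int) : List (List Int × List Int) :=
  let tgt := pvTargetBase target_pyr apex_list
  let table := pvTable pyramids tgt
  ((pyramids.zip table).filter (fun q => q.2.length == 2)).map (fun q => (q.1, PySem.Set.ofList q.2))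

-- ===== PRECONDITION & SPEC =====
def Spec_find_double_shared (target_pyr : List Int) (pyramids : List (List Int)) (apex_list : List Int) (out : List (List Int × List Int)) : Prop := out = find_double_shared_alt target_pyr pyramids apex_list
instance (target_pyr : List Int) (pyramids : List (List Int)) (apex_list : List Int) (out : List (List Int × List Int)) : Decidable (Spec_find_double_shared target_pyr pyramids apex_list out) := by unfold Spec_find_double_shared; infer_instance

-- ===== CLAIM (what is proved, stated in full; the proofs are below) =====
def Claim_equal_find_double_shared : Prop := ∀ (target_pyr : List Int) (pyramids : List (List Int)) (apex_list : List Int), Dom_find_double_shared target_pyr pyramids apex_list → Spec_find_double_shared target_pyr pyramids apex_list (find_double_shared target_pyr pyramids apex_list)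

-- ===== LEMMAS AND PROOFS =====

-- zipping a list with a map of itself pairs each element with its image
lemma pv_zip_map_self {α β : Type} (l : List α) (g : α → β) :
    l.zip (l.map g) = l.map (fun a => (a, g a)) := by
  simpa using (List.zip_map' (f := id) (g := g) (l := l))

-- B's filtered dedup loop builds exactly set(filter(q, xs)) in Python's order
lemma pv_dedup_foldl (q : Int → Bool) (xs : List Int) (acc : List Int) :
    List.foldl PySem.Set.add acc (xs.filter q)
      = xs.foldl (fun acc n => if q n && !acc.contains n then acc ++ [n] else acc) acc := by
  induction xs generalizing acc with
  | nil => rfl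
  | cons x xs ih =>
    rw [List.filter_cons]
    by_cases hq : q x = true
    · by_cases hc : acc.contains x = true <;>
        simp [hq, hc, PySem.Set.add, ih]
    · rw [if_neg hq, List.foldl_cons, if_neg (by simp [hq]), ih]

-- B's table fold: after processing `nodes`, slot i holds g pᵢ ++ the nodes contained in pᵢ
lemma pv_table (pyrs : List (List Int)) (nodes : List Int) (g : List Int → List Int) :
    nodes.foldl (fun tbl node =>
        (pyrs.zip tbl).map (fun q => if q.1.contains node then q.2 ++ [node] else q.2))
      (pyrs.map g)
    = pyrs.map (fun p => g p ++ nodes.filter (fun n => p.contains n)) := by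
  induction nodes generalizing g with
  | nil => simp
  | cons node ns ih =>
    rw [List.foldl_cons, pv_zip_map_self, List.map_map]
    rw [show ((fun q : List Int × List Int => if q.1.contains node then q.2 ++ [node] else q.2)
          ∘ fun p => (p, g p))
        = (fun p => if p.contains node then g p ++ [node] else g p) from rfl]
    rw [ih]
    congr 1; funext p
    by_cases hp : node ∈ p <;> simp [List.filter_cons, hp]

-- A's loop, assuming every element of tb is outside apex: it appends exactly the
-- pyramids whose filtered overlap with tb has length two
lemma pv_A_fold (apex tb : List Int) (htb : ∀ n ∈ tb, apex.contains n = false)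
    (ps : List (List Int)) (out : List (List Int × List Int)) :
    ps.foldl (fun out p =>
      let shared := PySem.Set.inter tb (pvBaseNodes p apex)
      if PySem.Set.len shared = 2 then out ++ [(p, shared)] else out) out
    = out ++ (ps.filter (fun p => (tb.filter (fun n => p.contains n)).length == 2)).map
        (fun p => (p, tb.filter (fun n => p.contains n))) := by
  induction ps generalizing out with
  | nil => simp
  | cons p ps ih =>
    have hsh : PySem.Set.inter tb (pvBaseNodes p apex)
        = tb.filter (fun n => p.contains n) := by
      show tb.filter (fun x => (pvBaseNodes p apex).contains x) = _
      apply List.filter_congr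
      intro n hn
      have hnap : n ∉ apex := by simpa using htb n hn
      cases hb : p.contains n
      · have hnp : n ∉ p := by simpa using hb
        simp [pvBaseNodes, PySem.Set.mem_ofList, List.mem_filter, hnp]
      · have hmem : n ∈ p := by simpa using hb
        simp [pvBaseNodes, PySem.Set.mem_ofList, List.mem_filter, hmem, hnap]
    have hF : (let shared := PySem.Set.inter tb (pvBaseNodes p apex)
        if PySem.Set.len shared = 2 then out ++ [(p, shared)] else out)
        = if (tb.filter (fun n => p.contains n)).length = 2
            then out ++ [(p, tb.filter (fun n => p.contains n))] else out := by
      show (if PySem.Set.len (PySem.Set.inter tb (pvBaseNodes p apex)) = 2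
          then out ++ [(p, PySem.Set.inter tb (pvBaseNodes p apex))] else out) = _
      rw [hsh]
      by_cases hc : (tb.filter (fun n => p.contains n)).length = 2
      · have h2 : PySem.Set.len (tb.filter (fun n => p.contains n)) = 2 := by
          unfold PySem.Set.len; exact_mod_cast hc
        rw [if_pos h2, if_pos hc]
      · have h2 : ¬ PySem.Set.len (tb.filter (fun n => p.contains n)) = 2 := by
          unfold PySem.Set.len; intro h; exact hc (by exact_mod_cast h)
        rw [if_neg h2, if_neg hc]
    rw [List.foldl_cons, hF, ih, List.filter_cons]
    by_cases hc : (tb.filter (fun n => p.contains n)).length = 2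
    · rw [if_pos hc,
        if_pos (show ((tb.filter (fun n => p.contains n)).length == 2) = true by
          simp only [beq_iff_eq]; exact hc),
        List.map_cons]
      simp [List.append_assoc]
    · rw [if_neg hc,
        if_neg (show ¬ ((tb.filter (fun n => p.contains n)).length == 2) = true by
          simp only [beq_iff_eq]; exact hc)]

-- ===== VERDICT (by name: the statement is the Claim_ definition above) =====
theorem find_double_shared_spec : Claim_equal_find_double_shared := by
  unfold Claim_equal_find_double_shared
  intro target_pyr pyramids apex_list _
  unfold Spec_find_double_shared
  unfold find_double_shared find_double_shared_alt
  set tb := PySem.Set.ofList (target_pyr.filter (fun n => !apex_list.contains n)) with htb_def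
  have htb : ∀ n ∈ tb, apex_list.contains n = false := by
    intro n hn
    rw [htb_def, PySem.Set.mem_ofList, List.mem_filter] at hn
    simpa using hn.2
  have hnd : tb.Nodup := PySem.Set.nodup_ofList _
  have h1 : pvTargetBase target_pyr apex_list = tb := by
    unfold pvTargetBase
    exact (pv_dedup_foldl (fun n => !apex_list.contains n) target_pyr []).symm
  have h2 : pvTable pyramids tb = pyramids.map (fun p => tb.filter (fun n => p.contains n)) := by
    unfold pvTable
    rw [pv_table pyramids tb (fun _ => ([] : List Int))]
    simp
  show _ = ((pyramids.zip (pvTable pyramids (pvTargetBase target_pyr apex_list))).filter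
      (fun q => q.2.length == 2)).map (fun q => (q.1, PySem.Set.ofList q.2))
  rw [show pvBaseNodes target_pyr apex_list = tb from rfl,
    pv_A_fold apex_list tb htb pyramids [], List.nil_append,
    h1, h2, pv_zip_map_self, List.filter_map, List.map_map]
  simp only [Function.comp_def]
  congr 1
  funext p
  rw [PySem.Set.ofList_eq_self_of_nodup _ (hnd.filter _)]
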